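-- pv_equiv track=rewrite | github.com/amxcodes/flowbot | scripts/check_gateway_terminal_frames.py | find_cfg_test_ranges
-- ===== SOURCE A (Python) =====
-- def find_cfg_test_ranges(lines: list[str]) -> list[tuple[int, int]]:
--     ranges: list[tuple[int, int]] = []
--     i = 0
--     while i < len(lines):
--         line = lines[i]
--         if "#[cfg(test)]" not in line:
--             i += 1
--             continue
--
--         j = i + 1
--         while j < len(lines) and not lines[j].strip():
--             j += 1
--         if j >= len(lines):
--             break
--
--         target = lines[j]
--         if "mod tests" not in target:
--             i = j + 1
--             continue
--
--         brace_balance = target.count("{") - target.count("}")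
--         start = j + 1
--         k = j + 1
--         while k < len(lines) and brace_balance > 0:
--             brace_balance += lines[k].count("{") - lines[k].count("}")
--             k += 1
--         end = k
--         ranges.append((start, end))
--         i = k
--     return ranges
-- ===== SOURCE B (Python) =====
-- def find_cfg_test_ranges(lines: list[str]) -> list[tuple[int, int]]:
--     # Single linear pass with an explicit state machine over enumerate(lines):
--     # 0 = LOOKING for '#[cfg(test)]', 1 = skipping blanks / judging the header,
--     # 2 = inside a 'mod tests' block tracking the brace balance.
--     ranges: list[tuple[int, int]] = []
--     state = 0
--     start = 0
--     bal = 0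
--     for idx, line in enumerate(lines):
--         if state == 0:
--             if "#[cfg(test)]" in line:
--                 state = 1
--         elif state == 1:
--             if not line.strip():
--                 continue
--             if "mod tests" not in line:
--                 state = 0
--                 continue
--             bal = line.count("{") - line.count("}")
--             if bal > 0:
--                 start = idx + 1
--                 state = 2
--             else:
--                 ranges.append((idx + 1, idx + 1))
--                 state = 0
--         else:
--             bal += line.count("{") - line.count("}")
--             if bal <= 0:
--                 ranges.append((start, idx + 1))
--                 state = 0
--     if state == 2:
--         ranges.append((start, len(lines)))
--     return ranges
-- ===== Notes on version B (the rewrite author's own statement) =====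
-- stated objective: alternative
-- what changed: A's nested while-loops with three jumping cursors (i, blank-skip j, brace-count k) are replaced by one linear for-loop over enumerate(lines) driven by an explicit three-state machine (LOOKING / HEADER / IN_BLOCK) with an EOF flush for an unclosed block.
import Mathlib
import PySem

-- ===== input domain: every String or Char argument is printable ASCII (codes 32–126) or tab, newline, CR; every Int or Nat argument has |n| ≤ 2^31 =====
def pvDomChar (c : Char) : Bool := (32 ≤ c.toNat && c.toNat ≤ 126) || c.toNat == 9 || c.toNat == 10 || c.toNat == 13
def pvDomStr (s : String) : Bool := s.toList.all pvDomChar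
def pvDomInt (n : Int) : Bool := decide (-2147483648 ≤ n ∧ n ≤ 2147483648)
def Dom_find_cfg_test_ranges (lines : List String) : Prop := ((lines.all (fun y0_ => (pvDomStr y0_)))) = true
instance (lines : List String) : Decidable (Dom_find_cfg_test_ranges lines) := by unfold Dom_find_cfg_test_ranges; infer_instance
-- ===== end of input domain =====

-- B replaces A's nested while-loops and jumping cursors by one linear pass with an
-- explicit three-state machine over enumerate(lines) (objective: alternative decomposition).

-- shared leaf helpers: 'line.count("{") - line.count("}")' and 'not line.strip()' truthiness
def pvDelta (s : String) : Int := (PySem.Str.count s "{" : Int) - (PySem.Str.count s "}" : Int)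
def pvBlank (s : String) : Bool := PySem.Str.strip s == ""

-- ===== PORT A =====
-- inner while: 'while j < len(lines) and not lines[j].strip(): j += 1'
def skipBlanksA (lines : List String) (j : Nat) : Nat :=
  if h : j < lines.length then
    if pvBlank lines[j] then skipBlanksA lines (j + 1) else j
  else j
termination_by lines.length - j

theorem skipBlanksA_ge (lines : List String) (j : Nat) : j ≤ skipBlanksA lines j := by
  fun_induction skipBlanksA lines j <;> omega

-- inner while: 'while k < len(lines) and brace_balance > 0: …'
def braceLoopA (lines : List String) (k : Nat) (bal : Int) : Nat :=
  if h : k < lines.length then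
    if 0 < bal then braceLoopA lines (k + 1) (bal + pvDelta lines[k]) else k
  else k
termination_by lines.length - k

theorem braceLoopA_ge (lines : List String) (k : Nat) (bal : Int) :
    k ≤ braceLoopA lines k bal := by
  fun_induction braceLoopA lines k bal <;> omega

-- outer 'while i < len(lines)' with its jumps (i+1 / j+1 / k)
def outerA (lines : List String) (i : Nat) (ranges : List (Int × Int)) : List (Int × Int) :=
  if h : i < lines.length then
    if ¬ PySem.Str.isIn "#[cfg(test)]" lines[i] then outerA lines (i + 1) ranges
    else
      if hj : skipBlanksA lines (i + 1) < lines.length then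
        if ¬ PySem.Str.isIn "mod tests" lines[skipBlanksA lines (i + 1)] then
          outerA lines (skipBlanksA lines (i + 1) + 1) ranges
        else
          outerA lines
            (braceLoopA lines (skipBlanksA lines (i + 1) + 1) (pvDelta lines[skipBlanksA lines (i + 1)]))
            (ranges ++ [(((skipBlanksA lines (i + 1) : Int) + 1),
              (braceLoopA lines (skipBlanksA lines (i + 1) + 1) (pvDelta lines[skipBlanksA lines (i + 1)]) : Int))])
      else ranges
  else ranges
termination_by lines.length - i
decreasing_by
  · omega
  · have := skipBlanksA_ge lines (i + 1); omega
  · have h1 := skipBlanksA_ge lines (i + 1)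
    have h2 := braceLoopA_ge lines (skipBlanksA lines (i + 1) + 1) (pvDelta lines[skipBlanksA lines (i + 1)])
    omega

def find_cfg_test_ranges (lines : List String) : List (Int × Int) :=
  outerA lines 0 []

-- ===== PORT B =====
-- one transition of the state machine; state 0 = LOOKING, 1 = HEADER (skip blanks /
-- judge the first non-blank line), 2 = IN_BLOCK (brace balance is the third component)
def stepB (st : Nat × Int × Int × List (Int × Int)) (p : Int × String) :
    Nat × Int × Int × List (Int × Int) :=
  match st with
  | (0, s, b, acc) =>
    if PySem.Str.isIn "#[cfg(test)]" p.2 then (1, s, b, acc) else (0, s, b, acc)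
  | (1, s, b, acc) =>
    if pvBlank p.2 then (1, s, b, acc)
    else if ¬ PySem.Str.isIn "mod tests" p.2 then (0, s, b, acc)
    else if 0 < pvDelta p.2 then (2, p.1 + 1, pvDelta p.2, acc)
    else (0, s, b, acc ++ [(p.1 + 1, p.1 + 1)])
  | (_, s, b, acc) =>
    if b + pvDelta p.2 ≤ 0 then (0, s, b + pvDelta p.2, acc ++ [(s, p.1 + 1)])
    else (2, s, b + pvDelta p.2, acc)

def find_cfg_test_ranges_alt (lines : List String) : List (Int × Int) :=
  let r := (PySem.List.enumerate lines 0).foldl stepB (0, 0, 0, [])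
  if r.1 = 2 then r.2.2.2 ++ [(r.2.1, (lines.length : Int))] else r.2.2.2

-- ===== PRECONDITION & SPEC =====
def Spec_find_cfg_test_ranges (lines : List String) (out : List (Int × Int)) : Prop := out = find_cfg_test_ranges_alt lines
instance (lines : List String) (out : List (Int × Int)) : Decidable (Spec_find_cfg_test_ranges lines out) := by unfold Spec_find_cfg_test_ranges; infer_instance

-- ===== CLAIM (what is proved, stated in full; the proofs are below) =====
def Claim_equal_find_cfg_test_ranges : Prop := ∀ (lines : List String), Dom_find_cfg_test_ranges lines → Spec_find_cfg_test_ranges lines (find_cfg_test_ranges lines)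

-- ===== LEMMAS AND PROOFS =====

-- A's continuation once the blank-skip has resolved to position j'
def resolveA (lines : List String) (j' : Nat) (acc : List (Int × Int)) : List (Int × Int) :=
  if hj : j' < lines.length then
    if ¬ PySem.Str.isIn "mod tests" lines[j'] then outerA lines (j' + 1) acc
    else
      outerA lines (braceLoopA lines (j' + 1) (pvDelta lines[j']))
        (acc ++ [(((j' : Int) + 1), (braceLoopA lines (j' + 1) (pvDelta lines[j']) : Int))])
  else acc

-- the post-loop flush of B
def finishB (lines : List String) (st : Nat × Int × Int × List (Int × Int)) : List (Int × Int) :=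
  if st.1 = 2 then st.2.2.2 ++ [(st.2.1, (lines.length : Int))] else st.2.2.2

theorem outerA_cfg (lines : List String) (i : Nat) (acc : List (Int × Int))
    (h : i < lines.length) (hc : PySem.Str.isIn "#[cfg(test)]" lines[i] = true) :
    outerA lines i acc = resolveA lines (skipBlanksA lines (i + 1)) acc := by
  rw [outerA, dif_pos h, if_neg (not_not_intro hc), resolveA]

theorem keyLemma (lines : List String) : ∀ (rest : List String) (i : Nat),
    i ≤ lines.length → lines.drop i = rest →
    ((∀ s b acc, finishB lines ((PySem.List.enumerate rest (i : Int)).foldl stepB (0, s, b, acc)) = outerA lines i acc)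
    ∧ (∀ s b acc, finishB lines ((PySem.List.enumerate rest (i : Int)).foldl stepB (1, s, b, acc)) = resolveA lines (skipBlanksA lines i) acc)
    ∧ (∀ s bal acc, 0 < bal → finishB lines ((PySem.List.enumerate rest (i : Int)).foldl stepB (2, s, bal, acc)) =
        outerA lines (braceLoopA lines i bal) (acc ++ [(s, (braceLoopA lines i bal : Int))]))) := by
  intro rest
  induction rest with
  | nil =>
    intro i hi hdrop
    have hlen : lines.length ≤ i := by
      by_contra hlt
      rw [List.drop_eq_nil_iff] at hdrop
      omega
    have hie : i = lines.length := le_antisymm hi hlen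
    refine ⟨?_, ?_, ?_⟩
    · intro s b acc
      rw [PySem.List.enumerate_nil, List.foldl_nil, outerA, dif_neg (by omega)]
      simp [finishB]
    · intro s b acc
      rw [PySem.List.enumerate_nil, List.foldl_nil, skipBlanksA, dif_neg (by omega),
        resolveA, dif_neg (by omega)]
      simp [finishB]
    · intro s bal acc hbal
      rw [PySem.List.enumerate_nil, List.foldl_nil, braceLoopA, dif_neg (by omega),
        outerA, dif_neg (by omega), hie]
      simp [finishB]
  | cons x rest ih =>
    intro i hi hdrop
    have hlt : i < lines.length := by
      by_contra hge
      rw [List.drop_eq_nil_of_le (by omega)] at hdrop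
      simp at hdrop
    have hx : lines[i] = x := by
      have h0 : lines[i]? = some x := by
        have := congrArg (fun l => l[0]?) hdrop
        simpa [List.getElem?_drop] using this
      simpa [List.getElem?_eq_getElem hlt] using h0
    have hdrop' : lines.drop (i + 1) = rest := by
      have := congrArg (List.drop 1) hdrop
      simpa [List.drop_drop, Nat.add_comm] using this
    have IH := ih (i + 1) (by omega) hdrop'
    have henum : PySem.List.enumerate (x :: rest) (i : Int) =
        ((i : Int), x) :: PySem.List.enumerate rest ((i + 1 : Nat) : Int) := by
      rw [PySem.List.enumerate_cons]; norm_cast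
    refine ⟨?_, ?_, ?_⟩
    · -- state LOOKING at line i
      intro s b acc
      rw [henum, List.foldl_cons]
      show finishB lines (List.foldl stepB
        (if PySem.Str.isIn "#[cfg(test)]" x then (1, s, b, acc) else (0, s, b, acc)) _) = _
      by_cases hc : PySem.Str.isIn "#[cfg(test)]" x = true
      · rw [if_pos hc, IH.2.1 s b acc, outerA_cfg lines i acc hlt (hx ▸ hc)]
      · rw [if_neg hc, IH.1 s b acc]
        conv_rhs => rw [outerA]
        rw [dif_pos hlt, hx, if_pos hc]
    · -- state HEADER at line i
      intro s b acc
      rw [henum, List.foldl_cons]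
      show finishB lines (List.foldl stepB
        (if pvBlank x then (1, s, b, acc)
         else if ¬ PySem.Str.isIn "mod tests" x then (0, s, b, acc)
         else if 0 < pvDelta x then (2, (i : Int) + 1, pvDelta x, acc)
         else (0, s, b, acc ++ [((i : Int) + 1, (i : Int) + 1)])) _) = _
      by_cases hbl : pvBlank x = true
      · rw [if_pos hbl, IH.2.1 s b acc]
        have hs : skipBlanksA lines i = skipBlanksA lines (i + 1) := by
          rw [skipBlanksA, dif_pos hlt, hx, if_pos hbl]
        rw [hs]
      · have hs : skipBlanksA lines i = i := by
          rw [skipBlanksA, dif_pos hlt, hx, if_neg hbl]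
        rw [if_neg hbl, hs, resolveA, dif_pos hlt, hx]
        by_cases hm : PySem.Str.isIn "mod tests" x = true
        · rw [if_neg (not_not_intro hm), if_neg (not_not_intro hm)]
          by_cases hpos : 0 < pvDelta x
          · rw [if_pos hpos, IH.2.2 ((i : Int) + 1) (pvDelta x) acc hpos]
          · rw [if_neg hpos, IH.1 s b (acc ++ [((i : Int) + 1, (i : Int) + 1)])]
            have hstop : braceLoopA lines (i + 1) (pvDelta x) = i + 1 := by
              rw [braceLoopA]
              split_ifs <;> rfl
            rw [hstop]
            norm_cast
        · rw [if_pos hm, if_pos hm, IH.1 s b acc]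
    · -- state IN_BLOCK at line i
      intro s bal acc hbal
      rw [henum, List.foldl_cons]
      show finishB lines (List.foldl stepB
        (if bal + pvDelta x ≤ 0 then (0, s, bal + pvDelta x, acc ++ [(s, (i : Int) + 1)])
         else (2, s, bal + pvDelta x, acc)) _) = _
      have hb : braceLoopA lines i bal = braceLoopA lines (i + 1) (bal + pvDelta x) := by
        rw [braceLoopA, dif_pos hlt, if_pos hbal, hx]
      by_cases hle : bal + pvDelta x ≤ 0
      · rw [if_pos hle, IH.1 s (bal + pvDelta x) (acc ++ [(s, (i : Int) + 1)])]
        have hstop : braceLoopA lines (i + 1) (bal + pvDelta x) = i + 1 := by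
          rw [braceLoopA]
          split_ifs with h1 h2
          · exact absurd h2 (by omega)
          · rfl
          · rfl
        rw [hb, hstop]
        norm_cast
      · rw [if_neg hle, IH.2.2 s (bal + pvDelta x) acc (by omega), hb]

-- ===== VERDICT (by name: the statement is the Claim_ definition above) =====
theorem find_cfg_test_ranges_spec : Claim_equal_find_cfg_test_ranges := by
  intro lines _
  unfold Spec_find_cfg_test_ranges find_cfg_test_ranges find_cfg_test_ranges_alt
  have h := (keyLemma lines lines 0 (by omega) (by simp)).1 0 0 []
  simpa [finishB] using h.symm
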